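-- pv_equiv track=rewrite | github.com/EzeVolyBlu/letris | funciones.py | puntuar
-- ===== SOURCE A (Python) =====
-- def puntuar(listaAciertos):
--
--     ctdadVocales = 0
--     ctdadDificiles = 0
--     ctdadConsonantes = 0
--
--     for palabra in listaAciertos:
--
--         for l in palabra:
--             if (l=='A' or l=='E' or l=='I' or l=='O' or l=='U'):
--                 ctdadVocales += 1
--             else:
--                 if (l=='J' or l=='K' or l=='Q' or l=='W' or l=='X' or l=='Y' or l=='Z'):
--                     ctdadDificiles +=1
--                 else:
--                     ctdadConsonantes +=1
--
--
--     puntaje=(ctdadVocales*1)+(ctdadDificiles*5)+(ctdadConsonantes*2)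
--
--     return puntaje
-- ===== SOURCE B (Python) =====
-- def puntuar(listaAciertos):
--     # Algebraic reformulation: every character scores a baseline of 2;
--     # a vowel scores 1 less, a hard consonant scores 3 more.
--     s = ''.join(listaAciertos)
--     vocales = sum(s.count(c) for c in 'AEIOU')
--     dificiles = sum(s.count(c) for c in 'JKQWXYZ')
--     return 2 * len(s) - vocales + 3 * dificiles
-- ===== Notes on version B (the rewrite author's own statement) =====
-- stated objective: faster
-- what changed: B replaces A's per-character three-way branch-and-count loop by an algebraic identity: join the words, take a baseline of 2*len, then correct it with per-letter str.count passes (-1 per vowel occurrence, +3 per hard-consonant occurrence); no per-character classification at all.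
import Mathlib
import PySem

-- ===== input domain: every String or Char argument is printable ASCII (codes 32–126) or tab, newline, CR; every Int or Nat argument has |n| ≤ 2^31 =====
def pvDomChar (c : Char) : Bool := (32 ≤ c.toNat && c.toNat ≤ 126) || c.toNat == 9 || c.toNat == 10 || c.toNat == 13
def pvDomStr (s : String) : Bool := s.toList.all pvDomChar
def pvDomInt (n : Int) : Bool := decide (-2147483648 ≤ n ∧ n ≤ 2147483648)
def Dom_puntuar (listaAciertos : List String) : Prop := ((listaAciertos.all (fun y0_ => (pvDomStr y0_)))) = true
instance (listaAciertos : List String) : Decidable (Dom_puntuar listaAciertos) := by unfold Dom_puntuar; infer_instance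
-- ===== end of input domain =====

-- B scores by the algebraic identity 2·len − vowels + 3·hard over counts of the joined
-- string, instead of A's per-character three-way branch into running counters (objective: faster; a timing run measured B faster, via C-level count/len instead of a per-character Python loop).

-- ===== PORT A =====
def puntuar (listaAciertos : List String) : Int :=
  let acc := listaAciertos.foldl
    (fun acc palabra => palabra.toList.foldl
      (fun (t : Int × Int × Int) l =>
        if l = 'A' ∨ l = 'E' ∨ l = 'I' ∨ l = 'O' ∨ l = 'U' then
          (t.1 + 1, t.2.1, t.2.2)
        else
          if l = 'J' ∨ l = 'K' ∨ l = 'Q' ∨ l = 'W' ∨ l = 'X' ∨ l = 'Y' ∨ l = 'Z' then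
            (t.1, t.2.1 + 1, t.2.2)
          else
            (t.1, t.2.1, t.2.2 + 1)) acc)
    ((0, 0, 0) : Int × Int × Int)
  acc.1 * 1 + acc.2.1 * 5 + acc.2.2 * 2

-- ===== PORT B =====
-- ''.join(listaAciertos) ported as the flattened character list of the words (exact).
def puntuar_alt (listaAciertos : List String) : Int :=
  let s := (listaAciertos.map String.toList).flatten
  let vocales := ("AEIOU".toList.map (fun c => (s.count c : Int))).sum
  let dificiles := ("JKQWXYZ".toList.map (fun c => (s.count c : Int))).sum
  2 * (s.length : Int) - vocales + 3 * dificiles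

-- ===== PRECONDITION & SPEC =====
def Spec_puntuar (listaAciertos : List String) (out : Int) : Prop := out = puntuar_alt listaAciertos
instance (listaAciertos : List String) (out : Int) : Decidable (Spec_puntuar listaAciertos out) := by unfold Spec_puntuar; infer_instance

-- ===== CLAIM (what is proved, stated in full; the proofs are below) =====
def Claim_equal_puntuar : Prop := ∀ (listaAciertos : List String), Dom_puntuar listaAciertos → Spec_puntuar listaAciertos (puntuar listaAciertos)

-- ===== LEMMAS AND PROOFS =====

-- the per-character weight both programs realise
def pvW (c : Char) : Int :=
  if c = 'A' ∨ c = 'E' ∨ c = 'I' ∨ c = 'O' ∨ c = 'U' then 1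
  else if c = 'J' ∨ c = 'K' ∨ c = 'Q' ∨ c = 'W' ∨ c = 'X' ∨ c = 'Y' ∨ c = 'Z' then 5
  else 2

-- A's inner loop advances the weighted value of the triple by the weights of the chars
lemma pvA_inner (cs : List Char) (t : Int × Int × Int) :
    let u := cs.foldl
      (fun (t : Int × Int × Int) l =>
        if l = 'A' ∨ l = 'E' ∨ l = 'I' ∨ l = 'O' ∨ l = 'U' then
          (t.1 + 1, t.2.1, t.2.2)
        else
          if l = 'J' ∨ l = 'K' ∨ l = 'Q' ∨ l = 'W' ∨ l = 'X' ∨ l = 'Y' ∨ l = 'Z' then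
            (t.1, t.2.1 + 1, t.2.2)
          else
            (t.1, t.2.1, t.2.2 + 1)) t
    u.1 * 1 + u.2.1 * 5 + u.2.2 * 2 = t.1 * 1 + t.2.1 * 5 + t.2.2 * 2 + (cs.map pvW).sum := by
  induction cs generalizing t with
  | nil => simp
  | cons c cs ih =>
    simp only [List.foldl_cons, List.map_cons, List.sum_cons]
    rw [ih]
    unfold pvW
    split_ifs <;> ring

-- A computes the total weight of all characters
lemma pvA_eq (xs : List String) :
    puntuar xs = ((xs.map String.toList).flatten.map pvW).sum := by
  unfold puntuar
  rw [← List.foldl_map (f := String.toList), ← List.foldl_flatten]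
  simpa using pvA_inner (xs.map String.toList).flatten ((0,0,0) : Int × Int × Int)

-- an indicator sum over a Nodup list of chars
lemma pvInd (x : Char) (ds : List Char) (hnd : ds.Nodup) :
    (ds.map (fun v => if v = x then (1 : Int) else 0)).sum
      = if ds.contains x then 1 else 0 := by
  induction ds with
  | nil => simp
  | cons d ds ih =>
    simp only [List.map_cons, List.sum_cons, List.contains_cons]
    rcases List.nodup_cons.mp hnd with ⟨hd, hnd'⟩
    by_cases h : d = x
    · subst h
      have : ∀ v ∈ ds, (if v = d then (1 : Int) else 0) = 0 := by
        intro v hv; have : v ≠ d := fun e => hd (e ▸ hv); simp [this]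
      rw [List.sum_eq_zero (by simpa using fun v hv => this v hv)]
      simp
    · rw [ih hnd']
      have h' : ¬ x = d := fun e => h e.symm
      simp [h, h']

-- summing per-letter counts over a Nodup letter list = counting membership
lemma pvCountSum (V chars : List Char) (hnd : V.Nodup) :
    (V.map (fun v => (chars.count v : Int))).sum
      = ((chars.countP (fun c => V.contains c) : Nat) : Int) := by
  induction chars with
  | nil => simp
  | cons c cs ih =>
    have hstep : ∀ v : Char,
        (((c :: cs).count v : Nat) : Int)
          = ((cs.count v : Nat) : Int) + (if v = c then (1 : Int) else 0) := by
      intro v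
      rw [List.count_cons]
      by_cases h : v = c
      · simp [h]
      · have h' : ¬ c = v := fun e => h e.symm
        simp [h, h']
    calc (V.map (fun v => (((c :: cs).count v : Nat) : Int))).sum
        = (V.map (fun v => ((cs.count v : Nat) : Int) + (if v = c then (1 : Int) else 0))).sum := by
          exact congrArg List.sum (List.map_congr_left (fun v _ => hstep v))
      _ = (V.map (fun v => ((cs.count v : Nat) : Int))).sum
            + (V.map (fun v => if v = c then (1 : Int) else 0)).sum := by
          rw [PySem.List.sum_map_add_int]
      _ = ((cs.countP (fun x => V.contains x) : Nat) : Int) + (if V.contains c then 1 else 0) := by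
          rw [ih, pvInd c V hnd]
      _ = (((c :: cs).countP (fun x => V.contains x) : Nat) : Int) := by
          rw [List.countP_cons]
          cases hb : V.contains c
          · simp [hb]
          · simp

-- membership in the two literal letter lists, as propositions
lemma pvMemV (c : Char) :
    ("AEIOU".toList.contains c = true) ↔ (c = 'A' ∨ c = 'E' ∨ c = 'I' ∨ c = 'O' ∨ c = 'U') := by
  have h : "AEIOU".toList = ['A','E','I','O','U'] := by decide
  rw [h]; simp [List.contains_eq_mem]

lemma pvMemH (c : Char) :
    ("JKQWXYZ".toList.contains c = true) ↔
      (c = 'J' ∨ c = 'K' ∨ c = 'Q' ∨ c = 'W' ∨ c = 'X' ∨ c = 'Y' ∨ c = 'Z') := by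
  have h : "JKQWXYZ".toList = ['J','K','Q','W','X','Y','Z'] := by decide
  rw [h]; simp [List.contains_eq_mem]

-- the algebraic identity: baseline 2 per char, −1 per vowel, +3 per hard consonant
lemma pvKey (chars : List Char) :
    2 * (chars.length : Int)
      - ((chars.countP (fun c => "AEIOU".toList.contains c) : Nat) : Int)
      + 3 * ((chars.countP (fun c => "JKQWXYZ".toList.contains c) : Nat) : Int)
    = (chars.map pvW).sum := by
  induction chars with
  | nil => simp
  | cons c cs ih =>
    simp only [List.countP_cons, List.length_cons, List.map_cons, List.sum_cons]
    by_cases hv : c = 'A' ∨ c = 'E' ∨ c = 'I' ∨ c = 'O' ∨ c = 'U'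
    · have hh : ¬(c = 'J' ∨ c = 'K' ∨ c = 'Q' ∨ c = 'W' ∨ c = 'X' ∨ c = 'Y' ∨ c = 'Z') := by
        rcases hv with rfl | rfl | rfl | rfl | rfl <;> decide
      have hv' : ("AEIOU".toList.contains c) = true := (pvMemV c).mpr hv
      have hh' : ("JKQWXYZ".toList.contains c) = false := by
        simpa using (fun e => hh ((pvMemH c).mp e))
      rw [← ih]; simp only [pvW, hv', hh', if_pos hv]
      push_cast; ring
    · by_cases hh : c = 'J' ∨ c = 'K' ∨ c = 'Q' ∨ c = 'W' ∨ c = 'X' ∨ c = 'Y' ∨ c = 'Z'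
      · have hv' : ("AEIOU".toList.contains c) = false := by
          simpa using (fun e => hv ((pvMemV c).mp e))
        have hh' : ("JKQWXYZ".toList.contains c) = true := (pvMemH c).mpr hh
        rw [← ih]; simp only [pvW, hv', hh', if_neg hv, if_pos hh]
        push_cast; ring
      · have hv' : ("AEIOU".toList.contains c) = false := by
          simpa using (fun e => hv ((pvMemV c).mp e))
        have hh' : ("JKQWXYZ".toList.contains c) = false := by
          simpa using (fun e => hh ((pvMemH c).mp e))
        rw [← ih]; simp only [pvW, hv', hh', if_neg hv, if_neg hh]
        push_cast; ring

-- B also computes the total weight of all characters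
lemma pvB_eq (xs : List String) :
    puntuar_alt xs = ((xs.map String.toList).flatten.map pvW).sum := by
  unfold puntuar_alt
  simp only
  rw [pvCountSum _ _ (by decide), pvCountSum _ _ (by decide)]
  exact pvKey _

-- ===== VERDICT (by name: the statement is the Claim_ definition above) =====
theorem puntuar_spec : Claim_equal_puntuar := by
  intro xs _
  unfold Spec_puntuar
  rw [pvA_eq, pvB_eq]
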